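-- pv_equiv track=rewrite | github.com/mjain533/perceptionChallenge | perception.py | densitysX
-- ===== SOURCE A (Python) =====
-- def densitysX(coordinates):
--     density = []
--     for coord in coordinates:
--         added = False
--         for group in density:
--             if abs(coord - group[-1]) <= 0:  # Adjust the threshold as needed
--                 group.append(coord)
--                 added = True
--                 break
--         if not added:
--             density.append([coord])
--     density = sorted(density, key=len, reverse=True)[:350]
--
--     return density
-- ===== SOURCE B (Python) =====
-- def densitysX(coordinates):
--     counts = {}
--     for coord in coordinates:
--         counts[coord] = counts.get(coord, 0) + 1
--     groups = [[v] * n for v, n in counts.items()]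
--     return sorted(groups, key=len, reverse=True)[:350]
-- ===== Notes on version B (the rewrite author's own statement) =====
-- stated objective: faster
-- what changed: Replaces the quadratic scan-all-groups-per-element grouping with a single hash-dict counting pass whose groups are rebuilt as value*count lists, then the same stable sort by size and truncation to 350.
import Mathlib
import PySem

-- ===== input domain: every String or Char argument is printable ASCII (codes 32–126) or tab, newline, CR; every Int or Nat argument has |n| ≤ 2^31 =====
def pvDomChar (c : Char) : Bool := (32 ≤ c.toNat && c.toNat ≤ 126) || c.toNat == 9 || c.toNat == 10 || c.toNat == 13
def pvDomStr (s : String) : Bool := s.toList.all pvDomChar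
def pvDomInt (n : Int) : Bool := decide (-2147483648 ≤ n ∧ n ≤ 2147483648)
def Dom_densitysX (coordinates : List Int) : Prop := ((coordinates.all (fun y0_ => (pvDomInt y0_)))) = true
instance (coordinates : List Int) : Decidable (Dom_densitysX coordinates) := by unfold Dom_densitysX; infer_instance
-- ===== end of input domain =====

-- B replaces A's quadratic scan-all-groups-per-element grouping by one hash-dict counting pass
-- (groups rebuilt as value*count lists), then the same stable sort by size and [:350]; objective: faster.

-- ===== PORT A =====
-- inner 'for group in density' loop: first group whose last element equals coord gets coord appended
-- (group[-1] via pyGet?; groups are always nonempty, so the .getD 0 default at the raise point is unreachable)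
def pvInnerA (coord : Int) : List (List Int) → Option (List (List Int))
  | [] => none
  | g :: rest =>
      if |coord - (PySem.List.pyGet? g (-1)).getD 0| ≤ 0 then
        some ((g ++ [coord]) :: rest)
      else
        (pvInnerA coord rest).map (g :: ·)

def densitysX (coordinates : List Int) : List (List Int) :=
  let density := coordinates.foldl (fun density coord =>
    match pvInnerA coord density with
    | some d => d
    | none => density ++ [[coord]]) []
  PySem.List.slice (PySem.List.sorted density (fun g => (g.length : Int)) true) none (some 350)

-- ===== PORT B =====
def densitysX_alt (coordinates : List Int) : List (List Int) :=
  let counts : PySem.Dict Int Int :=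
    coordinates.foldl (fun d coord => d.insert coord (d.getD coord 0 + 1)) PySem.Dict.empty
  let groups := counts.items.map (fun p => PySem.List.pyRepeat [p.1] p.2)
  PySem.List.slice (PySem.List.sorted groups (fun g => (g.length : Int)) true) none (some 350)

-- ===== PRECONDITION & SPEC =====
def Spec_densitysX (coordinates : List Int) (out : List (List Int)) : Prop := out = densitysX_alt coordinates
instance (coordinates : List Int) (out : List (List Int)) : Decidable (Spec_densitysX coordinates out) := by unfold Spec_densitysX; infer_instance

-- ===== CLAIM (what is proved, stated in full; the proofs are below) =====
def Claim_equal_densitysX : Prop := ∀ (coordinates : List Int), Dom_densitysX coordinates → Spec_densitysX coordinates (densitysX coordinates)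

-- ===== LEMMAS AND PROOFS =====

lemma pvLast_replicate (v : Int) (n : Nat) (h : 1 ≤ n) :
    PySem.List.pyGet? (List.replicate n v) (-1) = some v := by
  simp only [PySem.List.pyGet?, PySem.List.pyIdx?, Int.reduceNeg, Int.neg_nonneg, Int.reduceLE,
    ↓reduceIte, List.length_replicate, neg_le_neg_iff, Nat.one_le_cast, h, neg_neg, Int.toNat_one,
    Option.bind_some]
  simp [List.getElem?_replicate]
  omega

lemma pvInnerA_not_mem (coord : Int) (S : List Int) (c : Int → Nat)
    (h1 : ∀ v ∈ S, 1 ≤ c v) (h : coord ∉ S) :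
    pvInnerA coord (S.map (fun v => List.replicate (c v) v)) = none := by
  induction S with
  | nil => rfl
  | cons v S' ih =>
    simp only [List.map_cons, pvInnerA, pvLast_replicate v (c v) (h1 v (by simp)),
      Option.getD_some, abs_nonpos_iff, sub_eq_zero]
    have hne : coord ≠ v := by intro he; exact h (he ▸ List.mem_cons_self)
    rw [if_neg hne]
    rw [ih (fun w hw => h1 w (List.mem_cons_of_mem _ hw)) (fun hc => h (List.mem_cons_of_mem _ hc))]
    rfl

lemma pvInnerA_mem (coord : Int) (S : List Int) (c : Int → Nat)
    (h1 : ∀ v ∈ S, 1 ≤ c v) (hnd : S.Nodup) (h : coord ∈ S) :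
    pvInnerA coord (S.map (fun v => List.replicate (c v) v)) =
      some (S.map (fun v => List.replicate (if v = coord then c v + 1 else c v) v)) := by
  induction S with
  | nil => cases h
  | cons v S' ih =>
    simp only [List.map_cons, pvInnerA, pvLast_replicate v (c v) (h1 v (by simp)),
      Option.getD_some, abs_nonpos_iff, sub_eq_zero]
    rcases List.mem_cons.mp h with he | hm
    · subst he
      have hnotin : coord ∉ S' := (List.nodup_cons.mp hnd).1
      rw [if_pos rfl]
      congr 1
      rw [if_pos rfl, ← List.replicate_succ']
      congr 1
      exact (List.map_congr_left (fun w hw => by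
        rw [if_neg (by intro he; exact hnotin (he ▸ hw))])).symm
    · have hne : coord ≠ v := by
        intro he; exact (List.nodup_cons.mp hnd).1 (he ▸ hm)
      rw [if_neg hne]
      rw [ih (fun w hw => h1 w (List.mem_cons_of_mem _ hw)) (List.nodup_cons.mp hnd).2 hm]
      simp only [Option.map_some]
      congr 2
      rw [if_neg (fun he => hne he.symm)]

lemma pvLoopA_eq (xs : List Int) : ∀ (S : List Int) (c : Int → Nat),
    S.Nodup → (∀ v ∈ S, 1 ≤ c v) → (∀ v, v ∉ S → c v = 0) →
    xs.foldl (fun density coord =>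
        match pvInnerA coord density with
        | some d => d
        | none => density ++ [[coord]]) (S.map (fun v => List.replicate (c v) v))
      = (PySem.Set.update S xs).map (fun v => List.replicate (c v + xs.count v) v) := by
  induction xs with
  | nil => intro S c _ _ _; simp [PySem.Set.update]
  | cons x xs ih =>
    intro S c hnd h1 h0
    rw [List.foldl_cons]
    by_cases hx : x ∈ S
    · rw [pvInnerA_mem x S c h1 hnd hx]
      rw [show (S.map (fun v => List.replicate (if v = x then c v + 1 else c v) v)) =
          (S.map (fun v => List.replicate ((fun w => if w = x then c w + 1 else c w) v) v)) from rfl]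
      rw [ih S _ hnd
        (fun v hv => by
          show 1 ≤ if v = x then c v + 1 else c v
          by_cases hvx : v = x
          · rw [if_pos hvx]; omega
          · rw [if_neg hvx]; exact h1 v hv)
        (fun v hv => by
          show (if v = x then c v + 1 else c v) = 0
          rw [if_neg (fun he => hv (by rw [he]; exact hx))]; exact h0 v hv)]
      have hupd : PySem.Set.update S (x :: xs) = PySem.Set.update S xs := by
        simp only [PySem.Set.update, List.foldl_cons, PySem.Set.add, PySem.Set.contains]
        rw [if_pos (by simpa using hx)]
      rw [hupd]
      apply List.map_congr_left
      intro v _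
      show List.replicate ((if v = x then c v + 1 else c v) + xs.count v) v
            = List.replicate (c v + (x :: xs).count v) v
      congr 1
      by_cases hvx : v = x
      · subst hvx; rw [if_pos rfl]; simp only [List.count_cons_self]; omega
      · rw [if_neg hvx]; rw [List.count_cons_of_ne (fun he => hvx he.symm)]
    · rw [pvInnerA_not_mem x S c h1 hx]
      rw [show S.map (fun v => List.replicate (c v) v) ++ [[x]] =
          (S ++ [x]).map (fun v => List.replicate ((fun w => if w = x then 1 else c w) v) v) from by
        rw [List.map_append, List.map_singleton]
        congr 1
        · exact List.map_congr_left (fun w hw => by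
            show List.replicate (c w) w = List.replicate (if w = x then 1 else c w) w
            rw [if_neg (fun he => hx (by rw [← he]; exact hw))])
        · show [[x]] = [List.replicate (if x = x then 1 else c x) x]
          rw [if_pos rfl, List.replicate_one]]
      rw [ih (S ++ [x]) _
        (by simp [List.nodup_append, hnd]
            exact fun a ha he => hx (he ▸ ha))
        (fun v hv => by
          show 1 ≤ if v = x then 1 else c v
          by_cases hvx : v = x
          · rw [if_pos hvx]
          · rw [if_neg hvx]
            rcases List.mem_append.mp hv with h | h
            · exact h1 v h
            · simp only [List.mem_singleton] at h; exact absurd h hvx)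
        (fun v hv => by
          show (if v = x then 1 else c v) = 0
          simp only [List.mem_append, not_or, List.mem_singleton] at hv
          rw [if_neg hv.2]; exact h0 v hv.1)]
      have hupd : PySem.Set.update S (x :: xs) = PySem.Set.update (S ++ [x]) xs := by
        simp only [PySem.Set.update, List.foldl_cons, PySem.Set.add, PySem.Set.contains]
        rw [if_neg (by simpa using hx)]
      rw [hupd]
      apply List.map_congr_left
      intro v _
      show List.replicate ((if v = x then 1 else c v) + xs.count v) v
            = List.replicate (c v + (x :: xs).count v) v
      congr 1
      by_cases hvx : v = x
      · subst hvx; rw [if_pos rfl, h0 v hx]; simp only [List.count_cons_self]; omega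
      · rw [if_neg hvx]; rw [List.count_cons_of_ne (fun he => hvx he.symm)]

lemma pvDensityA (xs : List Int) :
    xs.foldl (fun density coord =>
        match pvInnerA coord density with
        | some d => d
        | none => density ++ [[coord]]) []
      = (PySem.Set.ofList xs).map (fun v => List.replicate (xs.count v) v) := by
  have := pvLoopA_eq xs [] (fun _ => 0) List.nodup_nil (by simp) (by simp)
  simpa [PySem.Set.ofList_eq_foldl, PySem.Set.update] using this

lemma pvGroupsB (xs : List Int) :
    (xs.foldl (fun d coord => d.insert coord (d.getD coord 0 + 1))
        (PySem.Dict.empty : PySem.Dict Int Int)).items.map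
        (fun p => PySem.List.pyRepeat [p.1] p.2)
      = (PySem.Set.ofList xs).map (fun v => List.replicate (xs.count v) v) := by
  rw [PySem.Dict.foldl_insert_getD_add_one_eq_counter, PySem.Dict.items_counter, List.map_map]
  apply List.map_congr_left
  intro v _
  simp [PySem.List.pyRepeat_singleton]

-- ===== VERDICT (by name: the statement is the Claim_ definition above) =====
theorem densitysX_spec : Claim_equal_densitysX := by
  intro xs _
  show densitysX xs = densitysX_alt xs
  unfold densitysX densitysX_alt
  dsimp only
  rw [pvDensityA, pvGroupsB]
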